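-- pv_equiv track=rewrite | github.com/ilya-kolchinsky/AgentAnalytics | agentanalytics/plugins/tool_use_patterns.py | _ngram_counts
-- ===== SOURCE A (Python) =====
-- from typing import Any, Dict, List
-- from collections import Counter
--
-- def _ngram_counts(seqs: List[List[str]], n: int) -> Counter:
--     c = Counter()
--     for s in seqs:
--         if len(s) < n:
--             continue
--         for i in range(len(s) - n + 1):
--             c[tuple(s[i : i + n])] += 1
--     return c
-- ===== SOURCE B (Python) =====
-- from collections import Counter, deque
--
-- def _ngram_counts(seqs, n):
--     if n <= 0:
--         return Counter()
--     c = Counter()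
--     for s in seqs:
--         window = deque(maxlen=n)
--         for tok in s:
--             window.append(tok)
--             if len(window) == n:
--                 c[tuple(window)] += 1
--     return c
-- ===== Notes on version B (the rewrite author's own statement) =====
-- stated objective: alternative
-- what changed: B streams each sequence token by token through a bounded sliding-window deque(maxlen=n), counting the window whenever it is full, instead of A's index loop that slices s[i:i+n] at every window start; no index arithmetic or slicing remains.
-- intended difference: For n <= 0 with nonempty seqs, A returns spurious counts that are artifacts of slicing with nonpositive n (empty-tuple keys counted once per window position, and for n < 0 also negative-stop slice fragments), while B returns the empty Counter, the intended 'no n-grams of nonpositive length' reading. — e.g. on _ngram_counts([["a"]], 0): A returns [([], 2)], B returns []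
import Mathlib
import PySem

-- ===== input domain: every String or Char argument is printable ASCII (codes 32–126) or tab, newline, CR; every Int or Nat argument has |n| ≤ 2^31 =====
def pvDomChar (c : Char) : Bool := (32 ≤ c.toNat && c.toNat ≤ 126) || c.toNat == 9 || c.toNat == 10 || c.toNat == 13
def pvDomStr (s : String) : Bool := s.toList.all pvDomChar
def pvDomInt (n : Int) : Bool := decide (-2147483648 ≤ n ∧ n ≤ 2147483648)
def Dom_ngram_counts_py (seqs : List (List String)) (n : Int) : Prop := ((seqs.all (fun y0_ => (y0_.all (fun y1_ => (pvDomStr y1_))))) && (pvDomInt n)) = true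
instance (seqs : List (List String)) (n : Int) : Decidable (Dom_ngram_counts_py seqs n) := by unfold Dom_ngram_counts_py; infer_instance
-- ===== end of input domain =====

-- B streams each sequence through a bounded sliding-window deque (append right, drop left when
-- full, count the window whenever it is full) instead of A's index loop slicing s[i:i+n];
-- alternative mechanism, same cost; for n ≤ 0 with nonempty input B intentionally returns an
-- empty Counter where A returns slicing artifacts (see D_).

-- ===== PORT A =====
def ngram_counts_py (seqs : List (List String)) (n : Int) : List (List String × Int) :=
  (seqs.foldl
    (fun (c : PySem.Dict (List String) Int) s =>
      if (s.length : Int) < n then c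
      else (PySem.List.pyRange 0 ((s.length : Int) - n + 1) 1).foldl
        (fun c i => c.modify (PySem.List.slice s (some i) (some (i + n))) 0 (· + 1)) c)
    PySem.Dict.empty).items

-- ===== PORT B =====
-- one streaming step: window.append(tok) on a deque(maxlen=m) (drop the leftmost element when
-- already full), then count the window if it is full — faithful deque semantics
def pvStep (m : Nat) (p : PySem.Dict (List String) Int × List String) (tok : String) :
    PySem.Dict (List String) Int × List String :=
  let w := if p.2.length = m then p.2.tail ++ [tok] else p.2 ++ [tok]
  (if w.length = m then p.1.modify w 0 (· + 1) else p.1, w)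

def ngram_counts_py_alt (seqs : List (List String)) (n : Int) : List (List String × Int) :=
  if n ≤ 0 then []
  else (seqs.foldl
    (fun (c : PySem.Dict (List String) Int) s => (s.foldl (pvStep n.toNat) (c, [])).1)
    PySem.Dict.empty).items

-- ===== PRECONDITION & SPEC =====
-- For n ≤ 0 with nonempty seqs, A returns spurious counts that are artifacts of slicing with
-- nonpositive n (empty-tuple keys, and for n < 0 also negative-stop slice fragments), while B
-- returns the empty Counter, the intended "there are no n-grams of nonpositive length" reading.
def D_ngram_counts_py (seqs : List (List String)) (n : Int) : Prop := n ≤ 0 ∧ seqs ≠ []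
instance (seqs : List (List String)) (n : Int) : Decidable (D_ngram_counts_py seqs n) := by unfold D_ngram_counts_py; infer_instance

def Spec_ngram_counts_py (seqs : List (List String)) (n : Int) (out : List (List String × Int)) : Prop := ¬ D_ngram_counts_py seqs n → out = ngram_counts_py_alt seqs n
instance (seqs : List (List String)) (n : Int) (out : List (List String × Int)) : Decidable (Spec_ngram_counts_py seqs n out) := by unfold Spec_ngram_counts_py; infer_instance

def pvDiffWitness_ngram_counts_py : List (List String) × Int := ([["a"]], 0)
def pvDiffWitnessOut_ngram_counts_py : (List (List String × Int)) × (List (List String × Int)) := ([([], 2)], [])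

-- ===== CLAIM (what is proved, stated in full; the proofs are below) =====
def Claim_unchanged_ngram_counts_py : Prop := ∀ (seqs : List (List String)) (n : Int), Dom_ngram_counts_py seqs n → Spec_ngram_counts_py seqs n (ngram_counts_py seqs n)
def Claim_changed_ngram_counts_py : Prop := Dom_ngram_counts_py (pvDiffWitness_ngram_counts_py.1) (pvDiffWitness_ngram_counts_py.2) ∧ D_ngram_counts_py (pvDiffWitness_ngram_counts_py.1) (pvDiffWitness_ngram_counts_py.2) ∧ ngram_counts_py (pvDiffWitness_ngram_counts_py.1) (pvDiffWitness_ngram_counts_py.2) = pvDiffWitnessOut_ngram_counts_py.1 ∧ ngram_counts_py_alt (pvDiffWitness_ngram_counts_py.1) (pvDiffWitness_ngram_counts_py.2) = pvDiffWitnessOut_ngram_counts_py.2 ∧ pvDiffWitnessOut_ngram_counts_py.1 ≠ pvDiffWitnessOut_ngram_counts_py.2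
def Claim_exact_ngram_counts_py : Prop := ∀ (seqs : List (List String)) (n : Int), Dom_ngram_counts_py seqs n → D_ngram_counts_py seqs n → ngram_counts_py seqs n ≠ ngram_counts_py_alt seqs n

-- ===== LEMMAS AND PROOFS =====

-- the list of width-m windows of q, in A's order
def pvWindows (m : Nat) (q : List String) : List (List String) :=
  (List.range (q.length + 1 - m)).map (fun i => (q.drop i).take m)

theorem pvWindows_nil_of_short (m : Nat) (q : List String) (h : q.length < m) :
    pvWindows m q = [] := by
  unfold pvWindows
  have : q.length + 1 - m = 0 := by omega
  simp [this]

-- appending one token adds exactly the window ending at it (when one fits)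
theorem pvWindows_snoc_ge (m : Nat) (p : List String) (t : String) (h : m ≤ p.length + 1) :
    pvWindows m (p ++ [t]) = pvWindows m p ++ [(p ++ [t]).drop (p.length + 1 - m)] := by
  unfold pvWindows
  have hlen : (p ++ [t]).length = p.length + 1 := by simp
  have h2 : (p ++ [t]).length + 1 - m = (p.length + 1 - m) + 1 := by simp; omega
  rw [h2, List.range_succ, List.map_append, List.map_singleton]
  congr 1
  · apply List.map_congr_left
    intro i hi
    have hi' : i < p.length + 1 - m := List.mem_range.1 hi
    have h3 : (p ++ [t]).drop i = p.drop i ++ [t] := List.drop_append_of_le_length (by omega)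
    rw [h3, List.take_append_of_le_length (by simp; omega)]
  · congr 1
    have h4 : ((p ++ [t]).drop (p.length + 1 - m)).length = m := by
      rw [List.length_drop, hlen]; omega
    exact List.take_of_length_le (by omega)

-- one streaming step from the state reached after prefix p moves to the state of prefix p ++ [t]
theorem pvStep_snoc (m : Nat) (hm : 1 ≤ m) (p : List String) (t : String)
    (c : PySem.Dict (List String) Int) :
    pvStep m ((pvWindows m p).foldl (fun c g => c.modify g 0 (· + 1)) c, p.drop (p.length - m)) t
      = ((pvWindows m (p ++ [t])).foldl (fun c g => c.modify g 0 (· + 1)) c,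
         (p ++ [t]).drop ((p ++ [t]).length - m) ) := by
  have hlen : (p ++ [t]).length = p.length + 1 := by simp
  rw [hlen]
  by_cases hc : m ≤ p.length
  · -- the window is full: slide it
    have hw : (p.drop (p.length - m)).length = m := by rw [List.length_drop]; omega
    unfold pvStep
    simp only [if_pos hw]
    have htail : (p.drop (p.length - m)).tail ++ [t] = (p ++ [t]).drop (p.length + 1 - m) := by
      rw [List.tail_drop, List.drop_append_of_le_length (by omega)]
      congr 2
      omega
    have hw' : ((p ++ [t]).drop (p.length + 1 - m)).length = m := by
      rw [List.length_drop, hlen]; omega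
    rw [htail]
    simp only [if_pos hw']
    rw [pvWindows_snoc_ge m p t (by omega), List.foldl_append]
    rfl
  · -- the window is not yet full: just append
    have hd0 : p.length - m = 0 := by omega
    have hd1 : p.length + 1 - m = 0 := by omega
    unfold pvStep
    simp only [hd0, List.drop_zero]
    rw [if_neg (by omega : ¬ p.length = m)]
    by_cases he : p.length + 1 = m
    · -- it just became full: count it
      have hnew : (p ++ [t]).length = m := by rw [hlen]; omega
      rw [if_pos hnew]
      rw [pvWindows_snoc_ge m p t (by omega), List.foldl_append, hd1, List.drop_zero]
      rfl
    · -- still short: no count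
      have hnew : ¬ (p ++ [t]).length = m := by rw [hlen]; omega
      rw [if_neg hnew]
      rw [pvWindows_nil_of_short m (p ++ [t]) (by rw [hlen]; omega),
          pvWindows_nil_of_short m p (by omega), hd1, List.drop_zero]

-- loop invariant: streaming the rest of the tokens after prefix p lands at the state of p ++ s
theorem pvFold_inv (m : Nat) (hm : 1 ≤ m) : ∀ (s p : List String) (c : PySem.Dict (List String) Int),
    s.foldl (pvStep m) ((pvWindows m p).foldl (fun c g => c.modify g 0 (· + 1)) c, p.drop (p.length - m))
      = ((pvWindows m (p ++ s)).foldl (fun c g => c.modify g 0 (· + 1)) c,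
         (p ++ s).drop ((p ++ s).length - m))
  | [], p, c => by simp
  | t :: s', p, c => by
    rw [List.foldl_cons, pvStep_snoc m hm p t c, pvFold_inv m hm s' (p ++ [t]) c]
    simp

-- B's per-sequence streaming loop computes A's per-sequence body for positive n
theorem pvBody_eq (n : Int) (hn : 1 ≤ n) (s : List String) (c : PySem.Dict (List String) Int) :
    (s.foldl (pvStep n.toNat) (c, [])).1
      = if (s.length : Int) < n then c
        else (PySem.List.pyRange 0 ((s.length : Int) - n + 1) 1).foldl
          (fun c i => c.modify (PySem.List.slice s (some i) (some (i + n))) 0 (· + 1)) c := by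
  obtain ⟨m, rfl⟩ : ∃ m : Nat, n = (m : Int) := ⟨n.toNat, by omega⟩
  have hm : 1 ≤ m := by omega
  have hstart : ((c : PySem.Dict (List String) Int), ([] : List String))
      = ((pvWindows m []).foldl (fun c g => c.modify g 0 (· + 1)) c, ([] : List String).drop (([] : List String).length - m)) := by
    rw [pvWindows_nil_of_short m [] (by simp; omega)]
    simp
  have htoNat : ((m : Int)).toNat = m := by omega
  rw [htoNat, hstart, pvFold_inv m hm s [] c]
  simp only [List.nil_append]
  by_cases hlt : (s.length : Int) < (m : Int)
  · rw [if_pos hlt, pvWindows_nil_of_short m s (by omega)]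
    rfl
  · rw [if_neg hlt, PySem.List.pyRange_one]
    unfold pvWindows
    have hK : ((s.length : Int) - (m : Int) + 1 - 0).toNat = s.length + 1 - m := by omega
    rw [hK, List.foldl_map, List.foldl_map]
    apply PySem.List.foldl_congr_mem
    intro acc x _
    congr 1
    have hc1 : ((0 : Int) + (x : Int)) = ((x : Nat) : Int) := by ring
    rw [hc1, PySem.List.slice_natCast_add]

-- for n ≤ 0 B returns the empty Counter
theorem pvAlt_nil (seqs : List (List String)) (n : Int) (hn : n ≤ 0) :
    ngram_counts_py_alt seqs n = [] := by
  simp [ngram_counts_py_alt, hn]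

theorem pvSetAdd_len (s : PySem.Set (List String)) (x : List String) :
    s.length ≤ (PySem.Set.add s x).length := by
  unfold PySem.Set.add
  split <;> simp

theorem pvSetUpdate_len : ∀ (l : List (List String)) (s : PySem.Set (List String)),
    s.length ≤ (PySem.Set.update s l).length
  | [], s => le_refl _
  | x :: t, s => by
    have h1 := pvSetAdd_len s x
    have h2 := pvSetUpdate_len t (PySem.Set.add s x)
    calc s.length ≤ (PySem.Set.add s x).length := h1
      _ ≤ _ := h2

-- A's loop body never shrinks the dict's key list
theorem pvABody_keys_le (n : Int) (s : List String) (d : PySem.Dict (List String) Int) :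
    d.keys.length ≤ ((if (s.length : Int) < n then d
      else (PySem.List.pyRange 0 ((s.length : Int) - n + 1) 1).foldl
        (fun c i => c.modify (PySem.List.slice s (some i) (some (i + n))) 0 (· + 1)) d).keys).length := by
  split
  · exact le_refl _
  · rw [PySem.Dict.keys_foldl_modify_key]
    simpa using pvSetUpdate_len _ d.keys

theorem pvAFold_keys_le (n : Int) : ∀ (rest : List (List String)) (d : PySem.Dict (List String) Int),
    d.keys.length ≤ ((rest.foldl
      (fun (c : PySem.Dict (List String) Int) s =>
        if (s.length : Int) < n then c
        else (PySem.List.pyRange 0 ((s.length : Int) - n + 1) 1).foldl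
          (fun c i => c.modify (PySem.List.slice s (some i) (some (i + n))) 0 (· + 1)) c) d).keys).length
  | [], d => le_refl _
  | s :: rest, d => by
    refine le_trans (pvABody_keys_le n s d) ?_
    exact pvAFold_keys_le n rest _

-- ===== VERDICT =====
theorem ngram_counts_py_spec : Claim_unchanged_ngram_counts_py := by
  intro seqs n _ hD
  by_cases hn : 1 ≤ n
  · unfold ngram_counts_py ngram_counts_py_alt
    rw [if_neg (by omega : ¬ n ≤ 0)]
    congr 1
    refine (PySem.List.foldl_congr_mem _ _ _ _ ?_).symm
    intro acc s _
    exact pvBody_eq n hn s acc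
  · unfold D_ngram_counts_py at hD
    have hseqs : seqs = [] := by
      by_contra h
      exact hD ⟨by omega, h⟩
    subst hseqs
    rw [pvAlt_nil [] n (by omega)]
    rfl

theorem ngram_counts_py_changed : Claim_changed_ngram_counts_py := by
  unfold Claim_changed_ngram_counts_py; decide

theorem ngram_counts_py_tight : Claim_exact_ngram_counts_py := by
  intro seqs n _ hD
  unfold D_ngram_counts_py at hD
  obtain ⟨hn, hne⟩ := hD
  rw [pvAlt_nil seqs n hn]
  obtain ⟨s, rest, rfl⟩ := List.exists_cons_of_ne_nil hne
  unfold ngram_counts_py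
  intro hcontra
  have hfirst : 1 ≤ ((if ((s.length : Int) < n) then (PySem.Dict.empty : PySem.Dict (List String) Int)
      else (PySem.List.pyRange 0 ((s.length : Int) - n + 1) 1).foldl
        (fun c i => c.modify (PySem.List.slice s (some i) (some (i + n))) 0 (· + 1)) PySem.Dict.empty).keys).length := by
    rw [if_neg (by omega)]
    rw [PySem.Dict.keys_foldl_modify_key]
    obtain ⟨i, l, hl⟩ : ∃ i l, (PySem.List.pyRange 0 ((s.length : Int) - n + 1) 1).map
        (fun i => PySem.List.slice s (some i) (some (i + n))) = i :: l := by
      have hnil : PySem.List.pyRange 0 ((s.length : Int) - n + 1) 1 ≠ [] := by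
        intro h
        have := congrArg List.length h
        rw [PySem.List.length_pyRange_one] at this
        simp at this
        omega
      cases hpr : PySem.List.pyRange 0 ((s.length : Int) - n + 1) 1 with
        | nil => exact absurd hpr hnil
        | cons a t => exact ⟨_, _, rfl⟩
    rw [hl]
    have hadd : (PySem.Set.add (PySem.Dict.empty : PySem.Dict (List String) Int).keys i).length = 1 := by
      simp [PySem.Set.add, PySem.Dict.empty, PySem.Dict.keys]
    show 1 ≤ (PySem.Set.update (PySem.Dict.empty : PySem.Dict (List String) Int).keys (i :: l)).length
    calc 1 = (PySem.Set.add (PySem.Dict.empty : PySem.Dict (List String) Int).keys i).length := hadd.symm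
      _ ≤ _ := pvSetUpdate_len l _
  have hall := le_trans hfirst (pvAFold_keys_le n rest _)
  have : ((rest.foldl
      (fun (c : PySem.Dict (List String) Int) s =>
        if (s.length : Int) < n then c
        else (PySem.List.pyRange 0 ((s.length : Int) - n + 1) 1).foldl
          (fun c i => c.modify (PySem.List.slice s (some i) (some (i + n))) 0 (· + 1)) c)
      (if ((s.length : Int) < n) then (PySem.Dict.empty : PySem.Dict (List String) Int)
       else (PySem.List.pyRange 0 ((s.length : Int) - n + 1) 1).foldl
        (fun c i => c.modify (PySem.List.slice s (some i) (some (i + n))) 0 (· + 1)) PySem.Dict.empty)).keys).length = 0 := by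
    simp only [PySem.Dict.keys]
    rw [List.foldl_cons] at hcontra
    rw [hcontra]
    rfl
  omega
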